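-- pv_equiv track=rewrite | github.com/Dreagonmon/vgp_app_reader | tools/text_remap.py | byte_size
-- ===== SOURCE A (Python) =====
-- def byte_size(first_byte):
--     pat = 0x01 << 7  # 1000000
--     l = 0  # length
--     while first_byte & pat != 0:
--         l = l + 1
--         pat = pat >> 1
--     if l == 0:
--         l = 1  # for ascii
--     return l
-- ===== SOURCE B (Python) =====
-- def byte_size(first_byte):
--     v = first_byte & 0xFF
--     if v < 0xC0:
--         return 1
--     if v < 0xE0:
--         return 2
--     if v < 0xF0:
--         return 3
--     if v < 0xF8:
--         return 4
--     if v < 0xFC: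
--         return 5
--     if v < 0xFE:
--         return 6
--     if v < 0xFF:
--         return 7
--     return 8
-- ===== Notes on version B (the rewrite author's own statement) =====
-- stated objective: idiomatic
-- what changed: Replaces the bit-by-bit leading-ones while-loop (mask shifted right each step) with a single mask v = first_byte & 0xFF followed by a direct range comparison chain mapping v to the UTF-8 length.
import Mathlib
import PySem

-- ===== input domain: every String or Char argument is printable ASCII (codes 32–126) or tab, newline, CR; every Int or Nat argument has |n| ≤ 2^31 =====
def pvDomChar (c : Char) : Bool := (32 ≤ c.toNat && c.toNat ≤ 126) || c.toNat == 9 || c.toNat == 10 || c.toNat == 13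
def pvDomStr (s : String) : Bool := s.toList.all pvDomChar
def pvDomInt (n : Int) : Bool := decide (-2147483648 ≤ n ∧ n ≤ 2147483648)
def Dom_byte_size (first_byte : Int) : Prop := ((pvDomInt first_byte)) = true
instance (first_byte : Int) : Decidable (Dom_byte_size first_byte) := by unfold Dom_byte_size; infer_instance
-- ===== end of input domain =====

-- B replaces A's bit-by-bit leading-ones scan with a direct range comparison on first_byte & 0xFF (alternative decomposition).


-- ===== PORT A =====
-- The while loop, with fuel only to make it total: pat starts at 0x01 << 7 = 128 and
-- halves each iteration, so at most 8 iterations run (at pat = 0 the condition is false);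
-- fuel 9 is never exhausted.
def byteLoopA (fuel : Nat) (first_byte : Int) (pat : Int) (l : Int) : Int :=
  match fuel with
  | 0 => l
  | fuel' + 1 =>
    if PySem.Int.band first_byte pat ≠ 0 then byteLoopA fuel' first_byte (pat >>> (1 : Nat)) (l + 1)
    else l

def byte_size (first_byte : Int) : Int :=
  let l := byteLoopA 9 first_byte ((0x01 : Int) <<< 7) 0
  if l = 0 then 1 else l

-- ===== PORT B =====
def byte_size_alt (first_byte : Int) : Int :=
  let v := PySem.Int.band first_byte 0xFF
  if v < 0xC0 then 1
  else if v < 0xE0 then 2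
  else if v < 0xF0 then 3
  else if v < 0xF8 then 4
  else if v < 0xFC then 5
  else if v < 0xFE then 6
  else if v < 0xFF then 7
  else 8

-- ===== PRECONDITION & SPEC =====
def Spec_byte_size (first_byte : Int) (out : Int) : Prop := out = byte_size_alt first_byte
instance (first_byte : Int) (out : Int) : Decidable (Spec_byte_size first_byte out) := by unfold Spec_byte_size; infer_instance

-- ===== CLAIM (what is proved, stated in full; the proofs are below) =====
def Claim_equal_byte_size : Prop := ∀ (first_byte : Int), Dom_byte_size first_byte → Spec_byte_size first_byte (byte_size first_byte)

-- ===== LEMMAS AND PROOFS =====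

-- Masking below 2^8 only sees the low 8 bits.
theorem nat_and_mod256 (m p : Nat) (hp : p < 256) : m &&& p = m % 256 &&& p := by
  apply Nat.eq_of_testBit_eq
  intro i
  by_cases h : i < 8
  · have h256 : (256 : Nat) = 2 ^ 8 := by norm_num
    rw [Nat.testBit_and, Nat.testBit_and, h256, Nat.testBit_mod_two_pow]
    simp [h]
  · have hpb : p.testBit i = false := by
      apply Nat.testBit_lt_two_pow
      calc p < 256 := hp
        _ = 2 ^ 8 := by norm_num
        _ ≤ 2 ^ i := Nat.pow_le_pow_right (by norm_num) (by omega)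
    simp [Nat.testBit_and, hpb]

-- The two's-complement subtraction form of AND-with-a-negative, exhaustively on 8 bits.
set_option maxHeartbeats 2000000 in
set_option maxRecDepth 100000 in
theorem nat_sub_and (c : Nat) (hc : c < 256) (p : Nat) (hp : p < 256) :
    p - (p &&& c) = (255 - c) &&& p := by
  revert p; revert c; decide

-- band with a mask below 256 only depends on the argument mod 256.
theorem band_mod256 (a p : Int) (hp0 : 0 ≤ p) (hp : p < 256) :
    PySem.Int.band a p = (((a % 256).toNat &&& p.toNat : Nat) : Int) := by
  rcases le_or_gt 0 a with ha | ha
  · rw [PySem.Int.band_of_nonneg ha hp0]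
    have h1 : (a % 256).toNat = a.toNat % 256 := by omega
    have h2 : p.toNat < 256 := by omega
    rw [h1, ← nat_and_mod256 a.toNat p.toNat h2]
  · unfold PySem.Int.band
    rw [if_neg (by omega), if_pos hp0]
    have h2 : p.toNat < 256 := by omega
    have h3 : (a % 256).toNat = 255 - (-a - 1).toNat % 256 := by omega
    rw [h3]
    congr 1
    calc p.toNat - (p.toNat &&& (-a - 1).toNat)
        = p.toNat - (p.toNat &&& (-a - 1).toNat % 256) := by
          rw [Nat.land_comm, nat_and_mod256 _ _ h2, Nat.land_comm]
      _ = (255 - (-a - 1).toNat % 256) &&& p.toNat :=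
          nat_sub_and _ (Nat.mod_lt _ (by norm_num)) _ h2

theorem int_shiftRight_one (p : Int) : p >>> (1 : Nat) = p / 2 := by
  have : p >>> (1 : Nat) = p / 2 ^ 1 := Int.shiftRight_eq_div_pow p 1
  simpa using this

-- The scan loop only depends on first_byte mod 256 while pat stays below 256.
theorem byteLoopA_mod256 (fuel : Nat) : ∀ (a pat l : Int), 0 ≤ pat → pat < 256 →
    byteLoopA fuel a pat l = byteLoopA fuel (((a % 256).toNat : Nat) : Int) pat l := by
  induction fuel with
  | zero => intro a pat l _ _; rfl
  | succ n ih =>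
    intro a pat l hp0 hp
    have hcond : PySem.Int.band a pat = PySem.Int.band (((a % 256).toNat : Nat) : Int) pat := by
      rw [band_mod256 a pat hp0 hp, band_mod256 _ pat hp0 hp]
      have : ((((a % 256).toNat : Nat) : Int) % 256).toNat = (a % 256).toNat := by omega
      rw [this]
    simp only [byteLoopA, hcond]
    split
    · exact ih _ _ _ (by rw [int_shiftRight_one]; omega) (by rw [int_shiftRight_one]; omega)
    · rfl

set_option maxRecDepth 10000 in
theorem small_cases : ∀ c : Nat, c < 256 → byte_size ((c : Nat) : Int) = byte_size_alt ((c : Nat) : Int) := by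
  decide

-- ===== VERDICT (by name: the statement is the Claim_ definition above) =====
theorem byte_size_spec : Claim_equal_byte_size := by
  intro a _
  unfold Spec_byte_size
  have hc : (a % 256).toNat < 256 := by omega
  have hA : byte_size a = byte_size (((a % 256).toNat : Nat) : Int) := by
    unfold byte_size
    rw [byteLoopA_mod256 9 a _ 0 (by decide) (by decide)]
  have hB : byte_size_alt a = byte_size_alt (((a % 256).toNat : Nat) : Int) := by
    unfold byte_size_alt
    have h255 : (0xFF : Int) = ((255 : Nat) : Int) := by norm_num
    rw [h255, band_mod256 a _ (by norm_num) (by norm_num),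
        band_mod256 _ _ (by decide) (by decide)]
    have : ((((a % 256).toNat : Nat) : Int) % 256).toNat = (a % 256).toNat := by omega
    rw [this]
  rw [hA, hB]
  exact small_cases _ hc
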